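-- pv_equiv track=rewrite | github.com/technocratslave-art/pmos-port-assist | pmos_port_assist.py | cluster_context
-- ===== SOURCE A (Python) =====
-- from typing import List, Dict, Optional, Set, Tuple
--
-- def cluster_context(lines: List[str], hit_line_nos: List[int], radius: int = 12, max_blocks: int = 8):
--     if not hit_line_nos:
--         return []
--     hit_line_nos = sorted(set(hit_line_nos))[:max_blocks]
--     blocks = []
--     last_end = 0
--     for ln in hit_line_nos:
--         start = max(1, ln - radius)
--         end = min(len(lines), ln + radius)
--         if blocks and start <= last_end:
--             prev_start, prev_end, _ = blocks[-1]
--             new_end = max(prev_end, end)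
--             blocks[-1] = (prev_start, new_end, lines[prev_start-1:new_end])
--             last_end = new_end
--         else:
--             blocks.append((start, end, lines[start-1:end]))
--             last_end = end
--     return blocks
-- ===== SOURCE B (Python) =====
-- def cluster_context(lines, hit_line_nos, radius=12, max_blocks=8):
--     if not hit_line_nos:
--         return []
--     hits = sorted(set(hit_line_nos))[:max_blocks]
--     if not hits:
--         return []
--     n = len(lines)
--     # cluster the hit numbers themselves by gap detection: a new span starts
--     # whenever a hit's window does not reach back into the previous hit's window
--     spans = []
--     first = last = hits[0]
--     for ln in hits[1:]:
--         if max(1, ln - radius) > min(n, last + radius):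
--             spans.append((first, last))
--             first = ln
--         last = ln
--     spans.append((first, last))
--     return [(max(1, a - radius), min(n, b + radius),
--              lines[max(1, a - radius) - 1:min(n, b + radius)])
--             for a, b in spans]
-- ===== Notes on version B (the rewrite author's own statement) =====
-- stated objective: alternative
-- what changed: B never builds or merges context intervals: it clusters the sorted hit line numbers themselves by gap detection (a new span starts when a hit's window does not reach back into the previous hit's window), records only (first_hit, last_hit) per span, and expands each span to its clamped block and slice in one final comprehension; A instead maintains a list of already-expanded blocks and destructively widens and re-slices the last block on overlap.
import Mathlib
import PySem

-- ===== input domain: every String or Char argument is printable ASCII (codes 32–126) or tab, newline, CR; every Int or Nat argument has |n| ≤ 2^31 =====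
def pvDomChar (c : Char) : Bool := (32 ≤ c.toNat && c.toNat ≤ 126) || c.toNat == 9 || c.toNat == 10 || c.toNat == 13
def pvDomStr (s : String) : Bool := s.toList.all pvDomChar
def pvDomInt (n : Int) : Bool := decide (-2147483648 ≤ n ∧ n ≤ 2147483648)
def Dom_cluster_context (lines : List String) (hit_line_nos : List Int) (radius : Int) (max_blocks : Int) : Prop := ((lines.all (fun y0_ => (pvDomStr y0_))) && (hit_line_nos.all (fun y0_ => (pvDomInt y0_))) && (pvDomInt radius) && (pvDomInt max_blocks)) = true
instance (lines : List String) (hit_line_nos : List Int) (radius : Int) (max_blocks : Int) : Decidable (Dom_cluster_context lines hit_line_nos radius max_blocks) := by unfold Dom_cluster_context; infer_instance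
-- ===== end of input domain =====

-- B clusters the hit line numbers themselves by gap detection into (first,last) spans and expands each span to a block once at the end; A merges and re-slices expanded blocks in place. Same values, similar cost.

-- ===== PORT A =====
-- A's loop: blocks kept in reverse (Python appends at the end / updates blocks[-1]); reversed on exit.
def clusterALoop (lines : List String) (radius : Int) :
    List Int → List (Int × Int × List String) → Int → List (Int × Int × List String)
  | [], rb, _ => rb.reverse
  | ln :: rest, rb, last_end =>
    let start := max 1 (ln - radius)
    let e := min (PySem.List.len lines) (ln + radius)
    match rb with
    | [] => clusterALoop lines radius rest [(start, e, PySem.List.slice lines (some (start - 1)) (some e))] e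
    | (ps, pe, sl) :: rbT =>
      if start ≤ last_end then
        clusterALoop lines radius rest
          ((ps, max pe e, PySem.List.slice lines (some (ps - 1)) (some (max pe e))) :: rbT) (max pe e)
      else
        clusterALoop lines radius rest
          ((start, e, PySem.List.slice lines (some (start - 1)) (some e)) :: (ps, pe, sl) :: rbT) e

def cluster_context (lines : List String) (hit_line_nos : List Int) (radius : Int) (max_blocks : Int) : List (Int × Int × List String) :=
  if hit_line_nos = [] then []
  else
    let hs := PySem.List.slice (PySem.List.sorted (PySem.Set.ofList hit_line_nos) (fun x => x) false) none (some max_blocks)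
    clusterALoop lines radius hs [] 0

-- ===== PORT B =====
-- B's gap-detection loop over the hit numbers: carries first/last of the open span; spans appended at the end.
def pvSpanLoop (n : Int) (radius : Int) :
    List Int → Int → Int → List (Int × Int) → List (Int × Int)
  | [], first, last, spans => spans ++ [(first, last)]
  | ln :: rest, first, last, spans =>
    if max 1 (ln - radius) > min n (last + radius) then
      pvSpanLoop n radius rest ln ln (spans ++ [(first, last)])
    else
      pvSpanLoop n radius rest first ln spans

def cluster_context_alt (lines : List String) (hit_line_nos : List Int) (radius : Int) (max_blocks : Int) : List (Int × Int × List String) :=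
  if hit_line_nos = [] then []
  else
    match PySem.List.slice (PySem.List.sorted (PySem.Set.ofList hit_line_nos) (fun x => x) false) none (some max_blocks) with
    | [] => []
    | h :: rest =>
      let n := PySem.List.len lines
      (pvSpanLoop n radius rest h h []).map
        (fun p => (max 1 (p.1 - radius), min n (p.2 + radius),
                   PySem.List.slice lines (some (max 1 (p.1 - radius) - 1)) (some (min n (p.2 + radius)))))

-- ===== PRECONDITION & SPEC =====
def Spec_cluster_context (lines : List String) (hit_line_nos : List Int) (radius : Int) (max_blocks : Int) (out : List (Int × Int × List String)) : Prop := out = cluster_context_alt lines hit_line_nos radius max_blocks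
instance (lines : List String) (hit_line_nos : List Int) (radius : Int) (max_blocks : Int) (out : List (Int × Int × List String)) : Decidable (Spec_cluster_context lines hit_line_nos radius max_blocks out) := by unfold Spec_cluster_context; infer_instance

-- ===== CLAIM =====
def Claim_equal_cluster_context : Prop := ∀ (lines : List String) (hit_line_nos : List Int) (radius : Int) (max_blocks : Int), Dom_cluster_context lines hit_line_nos radius max_blocks → Spec_cluster_context lines hit_line_nos radius max_blocks (cluster_context lines hit_line_nos radius max_blocks)

-- ===== LEMMAS AND PROOFS =====

-- expansion of a hit span (first,last) to a block, as in B's final comprehension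
def pvExpand (lines : List String) (radius : Int) (p : Int × Int) : Int × Int × List String :=
  (max 1 (p.1 - radius), min (PySem.List.len lines) (p.2 + radius),
   PySem.List.slice lines (some (max 1 (p.1 - radius) - 1)) (some (min (PySem.List.len lines) (p.2 + radius))))

lemma pvSliceNoneSublist {α : Type} (xs : List α) (b : Int) :
    (PySem.List.slice xs none (some b)).Sublist xs := by
  by_cases hb : 0 ≤ b
  · rw [PySem.List.slice_to _ hb]
    exact List.take_sublist _ _
  · have hk : 0 < (-b).toNat := by omega
    have hb' : b = -(((-b).toNat : Nat) : Int) := by omega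
    rw [hb', PySem.List.slice_to_neg_natCast _ _ hk]
    exact List.take_sublist _ _

lemma clusterALoop_eq_span (lines : List String) (radius : Int) :
    ∀ (hs : List Int) (first last : Int) (spans : List (Int × Int)),
      List.Pairwise (· ≤ ·) (last :: hs) →
      clusterALoop lines radius hs
          (((spans ++ [(first, last)]).map (pvExpand lines radius)).reverse)
          (min (PySem.List.len lines) (last + radius))
        = (pvSpanLoop (PySem.List.len lines) radius hs first last spans).map (pvExpand lines radius) := by
  intro hs
  induction hs with
  | nil =>
    intro first last spans _
    simp [clusterALoop, pvSpanLoop]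
  | cons ln rest ih =>
    intro first last spans hp
    have hle : last ≤ ln := (List.pairwise_cons.mp hp).1 ln (by simp)
    have hp' : List.Pairwise (· ≤ ·) (ln :: rest) := (List.pairwise_cons.mp hp).2
    have hmax : max (min (PySem.List.len lines) (last + radius)) (min (PySem.List.len lines) (ln + radius))
        = min (PySem.List.len lines) (ln + radius) := by
      simp only [PySem.List.len]; omega
    have hrev : ((spans ++ [(first, last)]).map (pvExpand lines radius)).reverse
        = pvExpand lines radius (first, last) :: (spans.map (pvExpand lines radius)).reverse := by
      simp
    by_cases h : max 1 (ln - radius) ≤ min (PySem.List.len lines) (last + radius)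
    · -- overlap: A widens the last block; B extends the open span
      rw [hrev]
      simp only [clusterALoop, pvSpanLoop, pvExpand]
      rw [if_pos h, if_neg (not_lt.mpr h), hmax]
      calc clusterALoop lines radius rest
              (((max 1 (first - radius), min (PySem.List.len lines) (ln + radius),
                 PySem.List.slice lines (some (max 1 (first - radius) - 1))
                   (some (min (PySem.List.len lines) (ln + radius))))) ::
               (spans.map (pvExpand lines radius)).reverse)
              (min (PySem.List.len lines) (ln + radius))
          = clusterALoop lines radius rest
              (((spans ++ [(first, ln)]).map (pvExpand lines radius)).reverse)
              (min (PySem.List.len lines) (ln + radius)) := by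
            simp [pvExpand]
        _ = (pvSpanLoop (PySem.List.len lines) radius rest first ln spans).map (pvExpand lines radius) :=
            ih first ln spans hp'
    · -- gap: A appends a fresh block; B closes the span and opens a new one
      rw [hrev]
      simp only [clusterALoop, pvSpanLoop, pvExpand]
      rw [if_neg h, if_pos (not_le.mp h)]
      calc clusterALoop lines radius rest
              ((max 1 (ln - radius), min (PySem.List.len lines) (ln + radius),
                PySem.List.slice lines (some (max 1 (ln - radius) - 1))
                  (some (min (PySem.List.len lines) (ln + radius)))) ::
               (max 1 (first - radius), min (PySem.List.len lines) (last + radius),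
                PySem.List.slice lines (some (max 1 (first - radius) - 1))
                  (some (min (PySem.List.len lines) (last + radius)))) ::
               (spans.map (pvExpand lines radius)).reverse)
              (min (PySem.List.len lines) (ln + radius))
          = clusterALoop lines radius rest
              ((((spans ++ [(first, last)]) ++ [(ln, ln)]).map (pvExpand lines radius)).reverse)
              (min (PySem.List.len lines) (ln + radius)) := by
            simp [pvExpand]
        _ = (pvSpanLoop (PySem.List.len lines) radius rest ln ln (spans ++ [(first, last)])).map (pvExpand lines radius) :=
            ih ln ln (spans ++ [(first, last)]) hp'

-- ===== VERDICT =====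
theorem cluster_context_spec : Claim_equal_cluster_context := by
  intro lines hit_line_nos radius max_blocks _
  unfold Spec_cluster_context cluster_context cluster_context_alt
  by_cases hnil : hit_line_nos = []
  · simp [hnil]
  · simp only [hnil, if_false]
    cases hh : PySem.List.slice (PySem.List.sorted (PySem.Set.ofList hit_line_nos) (fun x => x) false) none (some max_blocks) with
    | nil => simp [clusterALoop]
    | cons h rest =>
      have hpw : List.Pairwise (· ≤ ·) (h :: rest) := by
        have hs := PySem.List.sorted_ofList_pairwise_lt (xs := hit_line_nos)
        have hsub := pvSliceNoneSublist
          (PySem.List.sorted (PySem.Set.ofList hit_line_nos) (fun x => x) false) max_blocks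
        rw [hh] at hsub
        exact (hs.sublist hsub).imp (fun {a b} hab => le_of_lt hab)
      have step : clusterALoop lines radius (h :: rest) [] 0
          = clusterALoop lines radius rest
              ((([] ++ [(h, h)]).map (pvExpand lines radius)).reverse)
              (min (PySem.List.len lines) (h + radius)) := by
        simp [clusterALoop, pvExpand]
      rw [step, clusterALoop_eq_span lines radius rest h h [] hpw]
      simp [pvExpand]
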